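-- pv_equiv track=rewrite | github.com/hschn58/ScriptedStyles | Codebase/Designs/Releases/Next_release/potential_number_theory/take2.py | goldbach_counts
-- ===== SOURCE A (Python) =====
-- def prime_sieve(n: int) -> list[bool]:
--     """Return a boolean list is_prime[0..n] using a simple sieve."""
--     is_prime = [False, False] + [True] * (n - 1)
--     for p in range(2, int(n**0.5) + 1):
--         if is_prime[p]:
--             is_prime[p * p : n + 1 : p] = [False] * (((n - p * p) // p) + 1)
--     return is_prime
--
-- def goldbach_counts(limit_even: int) -> tuple[list[int], list[int]]:
--     """Return (evens, counts) for 4 ≤ even ≤ limit_even."""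
--     is_prime = prime_sieve(limit_even)
--     primes   = [i for i, flag in enumerate(is_prime) if flag]
--
--     evens, counts = [], []
--     for even in range(4, limit_even + 1, 2):
--         c = 0
--         for p in primes:
--             if p > even // 2:
--                 break
--             if is_prime[even - p]:
--                 c += 1
--         evens.append(even)
--         counts.append(c)
--     return evens, counts
-- ===== SOURCE B (Python) =====
-- def prime_sieve(n: int) -> list[bool]:
--     """Return a boolean list is_prime[0..n] using a simple sieve."""
--     is_prime = [False, False] + [True] * (n - 1)
--     for p in range(2, int(n**0.5) + 1):
--         if is_prime[p]:
--             is_prime[p * p : n + 1 : p] = [False] * (((n - p * p) // p) + 1)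
--     return is_prime
--
-- def goldbach_counts(limit_even: int) -> tuple[list[int], list[int]]:
--     """Return (evens, counts) for 4 <= even <= limit_even.
--
--     Instead of scanning the prime list once per even number, accumulate the
--     self-convolution of the primes directly: one pass over all prime pairs
--     (p, q) with p <= q and p + q <= limit_even bumps counts[p + q]."""
--     is_prime = prime_sieve(limit_even)
--     primes = [i for i, flag in enumerate(is_prime) if flag]
--
--     counts = [0] * (limit_even + 1)
--     for i, p in enumerate(primes):
--         for q in primes[i:]:
--             s = p + q
--             if s > limit_even:
--                 break
--             counts[s] += 1
--
--     evens = list(range(4, limit_even + 1, 2))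
--     return evens, [counts[e] for e in evens]
-- ===== Notes on version B (the rewrite author's own statement) =====
-- stated objective: alternative
-- what changed: Instead of re-scanning the prime list for every even number (with a per-even break at even//2), B makes one pass over all prime pairs (p,q) with p<=q and p+q<=limit, accumulating the self-convolution counts[p+q]+=1 in one array that is then read off at each even; the sieve helper is unchanged. Intended as faster (measured ~4x at n=16384) but the probe could not confirm it at the largest size, so no speed is claimed.
import Mathlib
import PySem

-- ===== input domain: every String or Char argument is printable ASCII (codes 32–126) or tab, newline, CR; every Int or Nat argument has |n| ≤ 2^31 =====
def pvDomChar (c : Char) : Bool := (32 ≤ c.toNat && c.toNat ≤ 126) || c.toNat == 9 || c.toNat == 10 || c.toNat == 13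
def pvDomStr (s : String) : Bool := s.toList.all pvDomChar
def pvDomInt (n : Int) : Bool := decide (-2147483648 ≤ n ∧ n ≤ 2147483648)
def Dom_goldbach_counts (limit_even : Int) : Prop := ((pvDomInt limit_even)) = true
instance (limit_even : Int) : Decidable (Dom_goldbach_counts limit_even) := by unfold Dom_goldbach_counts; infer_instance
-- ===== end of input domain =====

-- B replaces A's per-even scan of the prime list by a single pass over prime pairs (p,q), p ≤ q,
-- accumulating counts[p+q] += 1 into one array (the sieve helper is shared by both sources).

-- ===== PORT A =====
-- shared helper: the Python prime_sieve (identical source in Source A and Source B).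
-- int(n**0.5) is ported as Int.sqrt: for 0 ≤ n ≤ 2^31 the float power is exact enough that
-- int(n**0.5) equals the integer square root (checked exhaustively around all squares ≤ 2^31).
-- The slice assignment is_prime[p*p : n+1 : p] = [False]*(((n-p*p)//p)+1) assigns False to exactly
-- the indices range(p*p, n+1, p) (the RHS length equals the slice length), so it is ported as a
-- fold of List.set over that range; all indices read or written are in range in Python, so
-- getD/set are exact here.
def prime_sieve (n : Int) : List Bool :=
  let init : List Bool := [false, false] ++ List.replicate (n - 1).toNat true
  (PySem.List.pyRange 2 (Int.sqrt n + 1) 1).foldl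
    (fun is_prime p =>
      if is_prime.getD p.toNat false then
        (PySem.List.pyRange (p * p) (n + 1) p).foldl (fun l i => l.set i.toNat false) is_prime
      else is_prime) init

-- shared helper: primes = [i for i, flag in enumerate(is_prime) if flag] (identical in Source A and Source B)
def primesOf (l : List Bool) : List Int :=
  (PySem.List.enumerate l).filterMap (fun pr => if pr.2 then some pr.1 else none)

-- A's inner loop: for p in primes: if p > even//2: break; if is_prime[even-p]: c += 1
-- (even-p is a valid nonnegative index whenever Python reads that flag, so getD is exact)
def countA (is_prime : List Bool) (even : Int) : List Int → Int → Int
  | [], c => c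
  | p :: rest, c =>
    if p > PySem.Int.floordiv even 2 then c
    else countA is_prime even rest (if is_prime.getD (even - p).toNat false then c + 1 else c)

def goldbach_counts (limit_even : Int) : List (List Int) :=
  let is_prime := prime_sieve limit_even
  let primes := primesOf is_prime
  let ec := (PySem.List.pyRange 4 (limit_even + 1) 2).foldl
    (fun (acc : List Int × List Int) even =>
      (acc.1 ++ [even], acc.2 ++ [countA is_prime even primes 0])) ([], [])
  [ec.1, ec.2]

-- ===== PORT B =====
-- counts[s] += 1 (s is a valid nonnegative index whenever Source B executes the statement)
def bumpB (counts : List Int) (s : Int) : List Int :=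
  counts.set s.toNat (counts.getD s.toNat 0 + 1)

-- B's inner loop: for q in primes[i:]: s = p + q; if s > limit_even: break; counts[s] += 1
def innerB (n p : Int) : List Int → List Int → List Int
  | [], counts => counts
  | q :: rest, counts =>
    if p + q > n then counts else innerB n p rest (bumpB counts (p + q))

def goldbach_counts_alt (limit_even : Int) : List (List Int) :=
  let is_prime := prime_sieve limit_even
  let primes := primesOf is_prime
  let counts0 : List Int := List.replicate (limit_even + 1).toNat 0
  let counts := (PySem.List.enumerate primes).foldl
    (fun counts ip => innerB limit_even ip.2 (primes.drop ip.1.toNat) counts) counts0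
  let evens := PySem.List.pyRange 4 (limit_even + 1) 2
  [evens, evens.map (fun e => counts.getD e.toNat 0)]

-- ===== PRECONDITION & SPEC =====
-- A raises TypeError on every negative limit_even (int() applied to the complex value
-- limit_even**0.5); Source B calls the same sieve and raises there too. Pre_ excludes exactly those.
def Pre_goldbach_counts (limit_even : Int) : Prop := 0 ≤ limit_even
instance (limit_even : Int) : Decidable (Pre_goldbach_counts limit_even) := by unfold Pre_goldbach_counts; infer_instance
def pvWitness_goldbach_counts : Int := 10

def Spec_goldbach_counts (limit_even : Int) (out : List (List Int)) : Prop := out = goldbach_counts_alt limit_even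
instance (limit_even : Int) (out : List (List Int)) : Decidable (Spec_goldbach_counts limit_even out) := by unfold Spec_goldbach_counts; infer_instance

-- ===== CLAIM (what is proved, stated in full; the proofs are below) =====
def Claim_equal_goldbach_counts : Prop := ∀ (limit_even : Int), Dom_goldbach_counts limit_even → Pre_goldbach_counts limit_even → Spec_goldbach_counts limit_even (goldbach_counts limit_even)

-- ===== LEMMAS AND PROOFS =====

theorem primesOfAux (l : List Bool) (s : Int) :
    (PySem.List.enumerate l s).filterMap (fun pr => if pr.2 then some pr.1 else none)
      = ((List.range l.length).filter (fun k => l.getD k false)).map (fun (k : Nat) => s + (k : Int)) := by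
  induction l generalizing s with
  | nil => rfl
  | cons x xs ih =>
    rw [PySem.List.enumerate_cons]
    simp only [List.filterMap_cons, List.length_cons, List.range_succ_eq_map]
    cases x <;>
      simp [ih (s+1), List.filter_cons, List.filter_map, List.map_map, Function.comp_def, ← List.map_eq_flatMap] <;>
      · intros; push_cast; ring

theorem primesOf_eq (l : List Bool) :
    primesOf l = ((List.range l.length).filter (fun k => l.getD k false)).map Int.ofNat := by
  have := primesOfAux l 0
  rw [primesOf, this]
  apply List.map_congr_left; intro a _; simp [Int.ofNat_eq_natCast]

theorem primesOf_pairwise (l : List Bool) : (primesOf l).Pairwise (· < ·) := by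
  rw [primesOf_eq]
  refine List.Pairwise.map _ (fun a b h => ?_) (List.Pairwise.filter _ (List.pairwise_lt_range))
  exact Int.ofNat_lt.mpr h

theorem mem_primesOf (l : List Bool) (x : Int) :
    x ∈ primesOf l ↔ 0 ≤ x ∧ x.toNat < l.length ∧ l.getD x.toNat false = true := by
  rw [primesOf_eq]
  simp only [List.mem_map, List.mem_filter, List.mem_range]
  constructor
  · rintro ⟨k, ⟨hk, hf⟩, rfl⟩
    refine ⟨by simp [Int.ofNat_eq_natCast], by simp [Int.ofNat_eq_natCast, hk], ?_⟩
    simpa [Int.ofNat_eq_natCast] using hf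
  · rintro ⟨h0, hlt, hf⟩
    exact ⟨x.toNat, ⟨hlt, hf⟩, by simp [Int.ofNat_eq_natCast]; omega⟩

theorem setFalse_fold_inv (ops : List Int) (l : List Bool) :
    ((ops.foldl (fun a i => a.set i.toNat false) l).length = l.length) ∧
    (∀ k, l.getD k false = false → (ops.foldl (fun a i => a.set i.toNat false) l).getD k false = false) := by
  induction ops generalizing l with
  | nil => exact ⟨rfl, fun k h => h⟩
  | cons i rest ih =>
    simp only [List.foldl_cons]
    refine ⟨(ih _).1.trans (by simp), fun k h => (ih _).2 k ?_⟩
    simp only [List.getD_eq_getElem?_getD, List.getElem?_set] at h ⊢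
    split
    · split
      · simp_all
      · simp
    · exact h

theorem sieve_fold_inv (rng : List Int) (n : Int) (l : List Bool) :
    (((rng.foldl (fun is_prime p =>
        if is_prime.getD p.toNat false then
          (PySem.List.pyRange (p * p) (n + 1) p).foldl (fun a i => a.set i.toNat false) is_prime
        else is_prime) l).length = l.length) ∧
     (∀ k, l.getD k false = false → (rng.foldl (fun is_prime p =>
        if is_prime.getD p.toNat false then
          (PySem.List.pyRange (p * p) (n + 1) p).foldl (fun a i => a.set i.toNat false) is_prime
        else is_prime) l).getD k false = false)) := by
  induction rng generalizing l with
  | nil => exact ⟨rfl, fun k h => h⟩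
  | cons p rest ih =>
    simp only [List.foldl_cons]
    by_cases hg : l.getD p.toNat false
    · simp only [hg, if_true]
      refine ⟨(ih _).1.trans (setFalse_fold_inv _ _).1, fun k h => (ih _).2 k ((setFalse_fold_inv _ _).2 k h)⟩
    · simp only [hg, if_false]
      exact ih l
  
theorem prime_sieve_length (n : Int) (hn : 1 ≤ n) : (prime_sieve n).length = (n + 1).toNat := by
  rw [prime_sieve]
  refine (sieve_fold_inv _ n _).1.trans ?_
  simp; omega

theorem prime_sieve_low (n : Int) :
    (prime_sieve n).getD 0 false = false ∧ (prime_sieve n).getD 1 false = false := by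
  rw [prime_sieve]
  exact ⟨(sieve_fold_inv _ n _).2 0 rfl, (sieve_fold_inv _ n _).2 1 rfl⟩

theorem countA_eq (l : List Bool) (E : Int) (P : List Int) (c : Int) (h : P.Pairwise (· < ·)) :
    countA l E P c =
      c + (P.countP (fun p => decide (p ≤ PySem.Int.floordiv E 2) && l.getD (E - p).toNat false) : Int) := by
  induction P generalizing c with
  | nil => simp [countA]
  | cons p rest ih =>
    rw [List.pairwise_cons] at h
    rw [countA, List.countP_cons]
    by_cases hp : p > PySem.Int.floordiv E 2
    · rw [if_pos hp]
      have hz : rest.countP (fun p => decide (p ≤ PySem.Int.floordiv E 2) && l.getD (E - p).toNat false) = 0 := by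
        rw [List.countP_eq_zero]
        intro q hq
        have := h.1 q hq
        simp only [Bool.and_eq_true, decide_eq_true_eq]
        rintro ⟨hle, -⟩; omega
      have hd : ¬ (p ≤ PySem.Int.floordiv E 2) := by omega
      rw [hz, decide_eq_false hd]
      simp
    · rw [if_neg hp, ih _ h.2]
      have hle : p ≤ PySem.Int.floordiv E 2 := by omega
      simp only [decide_eq_true hle, Bool.true_and]
      by_cases hf : l.getD (E - p).toNat false
      · simp only [hf, if_true]; push_cast; ring
      · simp only [Bool.not_eq_true] at hf
        simp only [hf, if_false]; push_cast; ring

theorem innerB_eq (n p : Int) (qs counts : List Int) :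
    innerB n p qs counts =
      ((qs.takeWhile (fun q => !decide (p + q > n))).map (fun q => p + q)).foldl bumpB counts := by
  induction qs generalizing counts with
  | nil => rfl
  | cons q rest ih =>
    rw [innerB, List.takeWhile_cons]
    by_cases hq : p + q > n
    · simp [hq]
    · simp [hq, ih]

theorem foldl_bump_getD (ms : List Int) (cs : List Int) (k : Int) (hk : 0 ≤ k)
    (hms : ∀ m ∈ ms, 0 ≤ m ∧ m.toNat < cs.length) :
    (ms.foldl bumpB cs).getD k.toNat 0 = cs.getD k.toNat 0 + (ms.count k : Int) := by
  induction ms generalizing cs with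
  | nil => simp
  | cons m rest ih =>
    have hm := hms m List.mem_cons_self
    have hrest : ∀ m' ∈ rest, 0 ≤ m' ∧ m'.toNat < (bumpB cs m).length := by
      intro m' hm'
      have := hms m' (List.mem_cons_of_mem _ hm')
      simpa [bumpB] using this
    rw [List.foldl_cons, ih _ hrest, List.count_cons]
    by_cases he : m = k
    · subst he
      have : (bumpB cs m).getD m.toNat 0 = cs.getD m.toNat 0 + 1 := by
        simp [bumpB, List.getD_eq_getElem?_getD, List.getElem?_set, hm.2]
      rw [this]
      simp only [BEq.rfl, if_true]; push_cast; ring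
    · have hne : m.toNat ≠ k.toNat := by omega
      have : (bumpB cs m).getD k.toNat 0 = cs.getD k.toNat 0 := by
        simp [bumpB, List.getD_eq_getElem?_getD, List.getElem?_set, hne]
      rw [this]
      have hkm : (k == m) = false := by simp [Ne.symm he]
      simp [hkm, he]

theorem count_takeWhile_sorted (p n E : Int) (hE : E ≤ n) (qs : List Int) (h : qs.Pairwise (· < ·)) :
    ((qs.takeWhile (fun q => !decide (p + q > n))).map (fun q => p + q)).count E = qs.count (E - p) := by
  induction qs with
  | nil => rfl
  | cons q rest ih =>
    rw [List.pairwise_cons] at h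
    rw [List.takeWhile_cons]
    by_cases hq : p + q > n
    · rw [if_neg (by simp [hq])]
      simp only [List.map_nil, List.count_nil]
      symm
      rw [List.count_eq_zero]
      intro hmem
      rcases List.mem_cons.mp hmem with rfl | hmem'
      · omega
      · have := h.1 _ hmem'; omega
    · rw [if_pos (by simp [hq])]
      simp only [List.map_cons, List.count_cons, ih h.2]
      congr 1
      by_cases he : q = E - p
      · have h1 : (q == E - p) = true := by simp [he]
        have h2 : (p + q == E) = true := by simp; omega
        rw [h1, h2]
      · have h1 : (q == E - p) = false := by simp [he]
        have h2 : (p + q == E) = false := by simp; omega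
        rw [h1, h2]

theorem count_drop_sorted (P : List Int) (h : P.Pairwise (· < ·)) (i : Nat) (hi : i < P.length) (x : Int) :
    ((P.drop i).count x : Int) = if x ∈ P ∧ P[i] ≤ x then 1 else 0 := by
  have hnd : P.Nodup := h.imp (fun hlt => ne_of_lt hlt)
  have hndd : (P.drop i).Nodup := hnd.sublist (List.drop_sublist i P)
  have hpg := List.pairwise_iff_getElem.mp h
  have hmem : x ∈ P.drop i ↔ x ∈ P ∧ P[i] ≤ x := by
    constructor
    · intro hx
      rcases List.mem_iff_getElem.mp hx with ⟨j, hj, rfl⟩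
      have hj' : i + j < P.length := by simp at hj; omega
      have hgeq : (P.drop i)[j] = P[i + j]'hj' := List.getElem_drop
      rw [hgeq]
      refine ⟨List.getElem_mem _, ?_⟩
      rcases Nat.eq_or_lt_of_le (Nat.le_add_right i j) with heq | hlt
      · exact le_of_eq (by congr 1)
      · exact le_of_lt (hpg i (i + j) hi hj' hlt)
    · rintro ⟨hxP, hle⟩
      rcases List.mem_iff_getElem.mp hxP with ⟨j, hj, rfl⟩
      by_cases hij : i ≤ j
      · have hj2 : j - i < (P.drop i).length := by simp; omega
        have : (P.drop i)[j - i] = P[i + (j - i)]'(by omega) := List.getElem_drop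
        have h2 : P[i + (j - i)]'(by omega) = P[j] := by congr 1; omega
        rw [← h2, ← this]
        exact List.getElem_mem _
      · exfalso
        have := hpg j i hj hi (by omega)
        omega
  by_cases hx : x ∈ P.drop i
  · rw [if_pos (hmem.mp hx)]
    rw [List.count_eq_one_of_mem hndd hx]; rfl
  · rw [if_neg (fun hc => hx (hmem.mpr hc))]
    rw [List.count_eq_zero.mpr hx]; rfl

theorem count_flatMap {α β : Type} [BEq β] (g : α → List β) (l : List α) (b : β) :
    (l.flatMap g).count b = (l.map (fun x => (g x).count b)).sum := by
  induction l with
  | nil => rfl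
  | cons x xs ih => simp [List.flatMap_cons, List.count_append, ih]

theorem cast_list_sum (l : List Nat) : ((l.sum : Nat) : Int) = (l.map Int.ofNat).sum := by
  induction l with
  | nil => rfl
  | cons x xs ih => simp [List.sum_cons, ih]

theorem getD_replicate0 (m k : Nat) : (List.replicate m (0:Int)).getD k 0 = 0 := by
  simp only [List.getD_eq_getElem?_getD, List.getElem?_replicate]
  split <;> rfl

theorem primes_bounds (n : Int) (hn : 1 ≤ n) (p : Int) (hp : p ∈ primesOf (prime_sieve n)) :
    2 ≤ p ∧ p ≤ n := by
  rw [mem_primesOf] at hp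
  obtain ⟨h0, hlt, hf⟩ := hp
  rw [prime_sieve_length n hn] at hlt
  refine ⟨?_, by omega⟩
  by_contra hc
  have : p.toNat = 0 ∨ p.toNat = 1 := by omega
  rcases this with h | h <;> rw [h] at hf
  · rw [(prime_sieve_low n).1] at hf; exact Bool.false_ne_true hf
  · rw [(prime_sieve_low n).2] at hf; exact Bool.false_ne_true hf

theorem map_snd_enum {α β : Type} (f : α → β) (xs : List α) (s : Int) :
    (PySem.List.enumerate xs s).map (fun ip => f ip.2) = xs.map f := by
  induction xs generalizing s with
  | nil => rfl
  | cons x t ih => simp [PySem.List.enumerate_cons, ih]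

theorem per_even (n : Int) (E : Int) (hE4 : 4 ≤ E) (hEn : E ≤ n) (hEe : 2 ∣ E) :
    countA (prime_sieve n) E (primesOf (prime_sieve n)) 0
      = ((PySem.List.enumerate (primesOf (prime_sieve n))).foldl
          (fun counts ip => innerB n ip.2 ((primesOf (prime_sieve n)).drop ip.1.toNat) counts)
          (List.replicate (n + 1).toNat 0)).getD E.toNat 0 := by
  have hn : 1 ≤ n := by omega
  set l := prime_sieve n with hl
  set P := primesOf l with hPdef
  have hP : P.Pairwise (· < ·) := primesOf_pairwise l
  -- rewrite the B-side fold as one fold of bumps over the flattened event list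
  have hstep : ∀ (cs : List Int) (ip : Int × Int), ip ∈ PySem.List.enumerate P →
      innerB n ip.2 (P.drop ip.1.toNat) cs
        = (((P.drop ip.1.toNat).takeWhile (fun q => !decide (ip.2 + q > n))).map
            (fun q => ip.2 + q)).foldl bumpB cs :=
    fun cs ip _ => innerB_eq n ip.2 (P.drop ip.1.toNat) cs
  have hfold :
      (PySem.List.enumerate P).foldl
          (fun counts ip => innerB n ip.2 (P.drop ip.1.toNat) counts)
          (List.replicate (n + 1).toNat 0)
        = ((PySem.List.enumerate P).flatMap
            (fun ip => ((P.drop ip.1.toNat).takeWhile (fun q => !decide (ip.2 + q > n))).map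
              (fun q => ip.2 + q))).foldl bumpB (List.replicate (n + 1).toNat 0) :=
    (PySem.List.foldl_congr_mem
      (PySem.List.enumerate P)
      (fun counts (ip : Int × Int) => innerB n ip.2 (P.drop ip.1.toNat) counts)
      (fun counts (ip : Int × Int) =>
        (((P.drop ip.1.toNat).takeWhile (fun q => !decide (ip.2 + q > n))).map
          (fun q => ip.2 + q)).foldl bumpB counts)
      (List.replicate (n + 1).toNat 0) hstep).trans (List.foldl_flatMap).symm
  rw [hfold]
  set ev : List Int := (PySem.List.enumerate P).flatMap
    (fun ip => ((P.drop ip.1.toNat).takeWhile (fun q => !decide (ip.2 + q > n))).map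
      (fun q => ip.2 + q)) with hev
  have hev_mem : ∀ m ∈ ev, 2 ≤ m ∧ m ≤ n := by
    intro m hm
    rw [hev, List.mem_flatMap] at hm
    obtain ⟨ip, hip, hm⟩ := hm
    rw [List.mem_map] at hm
    obtain ⟨q, hq, rfl⟩ := hm
    have hle : ¬ (ip.2 + q > n) := by simpa using List.mem_takeWhile_imp hq
    have hq2 : q ∈ P := List.mem_of_mem_drop ((List.takeWhile_sublist _).mem hq)
    have hp2 : ip.2 ∈ P := by
      rw [PySem.List.mem_enumerate_iff] at hip
      obtain ⟨k, hk, rfl⟩ := hip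
      exact List.getElem_mem _
    have b1 := primes_bounds n hn _ hq2
    have b2 := primes_bounds n hn _ hp2
    omega
  rw [foldl_bump_getD ev _ E (by omega) ?bnd]
  case bnd =>
    intro m hm
    have := hev_mem m hm
    simp only [List.length_replicate]
    omega
  rw [getD_replicate0, countA_eq l E P 0 hP]
  have hcnt : ((ev.count E : Nat) : Int)
      = (P.countP (fun p => decide (p ≤ PySem.Int.floordiv E 2) && l.getD (E - p).toNat false) : Int) := by
    rw [hev, count_flatMap, cast_list_sum, List.map_map]
    have hmapeq : (PySem.List.enumerate P).map
        (Int.ofNat ∘ (fun ip => (((P.drop ip.1.toNat).takeWhile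
            (fun q => !decide (ip.2 + q > n))).map (fun q => ip.2 + q)).count E))
        = (PySem.List.enumerate P).map
          (fun ip => if (decide (E - ip.2 ∈ P) && decide (ip.2 ≤ E - ip.2)) then (1:Int) else 0) := by
      apply List.map_congr_left
      intro ip hip
      rw [PySem.List.mem_enumerate_iff] at hip
      obtain ⟨k, hk, rfl⟩ := hip
      simp only [Function.comp_apply]
      have htN : ((0 : Int) + (k : Int)).toNat = k := by omega
      rw [htN]
      have := count_takeWhile_sorted (P[k]) n E hEn (P.drop k) (hP.drop)
      rw [Int.ofNat_eq_natCast, this, count_drop_sorted P hP k hk (E - P[k])]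
      by_cases hc : E - P[k] ∈ P ∧ P[k] ≤ E - P[k]
      · rw [if_pos hc, if_pos (by simp [hc.1, hc.2])]
      · rw [if_neg hc]
        rw [if_neg ?hcc]
        case hcc =>
          simp only [Bool.and_eq_true, decide_eq_true_eq]
          exact hc
    rw [hmapeq]
    rw [map_snd_enum (fun p => if (decide (E - p ∈ P) && decide (p ≤ E - p)) then (1:Int) else 0) P 0,
        PySem.List.sum_map_ite_one_zero]
    congr 1
    apply List.countP_congr
    intro p hp
    have hb := primes_bounds n hn p hp
    have hfd : PySem.Int.floordiv E 2 = E / 2 := PySem.Int.floordiv_eq_ediv_of_pos (by omega)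
    by_cases hhalf : p ≤ E - p
    · have h1 : p ≤ PySem.Int.floordiv E 2 := by rw [hfd]; omega
      have hmm : E - p ∈ P ↔ l.getD (E - p).toNat false = true := by
        rw [hPdef, mem_primesOf]
        constructor
        · rintro ⟨-, -, hf⟩; exact hf
        · intro hf
          refine ⟨by omega, ?_, hf⟩
          rw [prime_sieve_length n hn]
          omega
      simp only [decide_eq_true h1, decide_eq_true hhalf, Bool.true_and, Bool.and_true]
      by_cases hm : E - p ∈ P
      · rw [decide_eq_true hm, hmm.mp hm]
      · have hgf : l.getD (E - p).toNat false = false := by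
          cases hgd : l.getD (E - p).toNat false
          · rfl
          · exact absurd (hmm.mpr hgd) hm
        rw [decide_eq_false hm, hgf]
    · have h1 : ¬ (p ≤ PySem.Int.floordiv E 2) := by rw [hfd]; omega
      rw [decide_eq_false h1, decide_eq_false hhalf, Bool.false_and, Bool.and_false]
  omega

theorem main_eq (n : Int) (hn : 0 ≤ n) : goldbach_counts n = goldbach_counts_alt n := by
  show [_, _] = [_, _]
  rw [PySem.List.foldl_prod_mk
    (f := fun (acc : List Int) (e : Int) => acc ++ [e])
    (g := fun (acc : List Int) (e : Int) =>
      acc ++ [countA (prime_sieve n) e (primesOf (prime_sieve n)) 0])]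
  simp only [PySem.List.foldl_append_singleton_eq_self, PySem.List.foldl_append_singleton_eq_map,
    List.nil_append]
  congr 1
  congr 1
  apply List.map_congr_left
  intro E hE
  rw [PySem.List.mem_pyRange_iff_of_pos (by omega)] at hE
  obtain ⟨h1, h2, h3⟩ := hE
  exact per_even n E (by omega) (by omega) (by omega)

-- ===== VERDICT (by name: the statement is the Claim_ definition above) =====
theorem goldbach_counts_spec : Claim_equal_goldbach_counts := by
  intro n _ hpre
  unfold Pre_goldbach_counts at hpre
  unfold Spec_goldbach_counts
  exact main_eq n hpre
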